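-- pv_equiv track=rewrite | github.com/dcook604/stratacrm | api/app/services/email_ingest.py | _is_sender_allowed
-- ===== SOURCE A (Python) =====
-- from typing import Optional
--
-- def _is_sender_allowed(reporter_email: str, allowed_senders: Optional[str]) -> bool:
--     """Return True if reporter_email matches the allowlist, or if no list is configured.
--
--     Each entry in the comma-separated list is matched as:
--     - exact email address:  alice@example.com
--     - domain with @-prefix: @example.com  (matches any address at that domain)
--     - bare domain:           example.com   (same as @example.com)
--     """
--     if not allowed_senders or not allowed_senders.strip():
--         return True
--     entries = [e.strip().lower() for e in allowed_senders.split(",") if e.strip()]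
--     if not entries:
--         return True
--     email_lower = (reporter_email or "").lower()
--     for entry in entries:
--         if entry.startswith("@"):
--             if email_lower.endswith(entry):
--                 return True
--         elif "@" not in entry:
--             if email_lower.endswith("@" + entry):
--                 return True
--         else:
--             if email_lower == entry:
--                 return True
--     return False
-- ===== SOURCE B (Python) =====
-- from typing import Optional
--
-- def _is_sender_allowed(reporter_email: str, allowed_senders: Optional[str]) -> bool:
--     """Allowlist check via a prebuilt index: exact-email set + domain set,
--     answered by membership lookups on the email and its after-'@' suffixes."""
--     if not allowed_senders or not allowed_senders.strip():
--         return True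
--     entries = [e.strip().lower() for e in allowed_senders.split(",") if e.strip()]
--     if not entries:
--         return True
--     exact_emails = set()
--     domains = set()
--     for entry in entries:
--         if entry.startswith("@"):
--             domains.add(entry[1:])
--         elif "@" not in entry:
--             domains.add(entry)
--         else:
--             exact_emails.add(entry)
--     email_lower = (reporter_email or "").lower()
--     if email_lower in exact_emails:
--         return True
--     tail = email_lower
--     while "@" in tail:
--         tail = tail.split("@", 1)[1]
--         if tail in domains:
--             return True
--     return False
-- ===== Notes on version B (the rewrite author's own statement) =====
-- stated objective: idiomatic
-- what changed: A scans every allowlist entry doing per-entry startswith/endswith/equality tests against the email; B makes one classifying pass that builds an exact-email set and a domain set, then answers by a set lookup of the lowered email plus lookups of each after-'@' suffix of the email.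
import Mathlib
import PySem

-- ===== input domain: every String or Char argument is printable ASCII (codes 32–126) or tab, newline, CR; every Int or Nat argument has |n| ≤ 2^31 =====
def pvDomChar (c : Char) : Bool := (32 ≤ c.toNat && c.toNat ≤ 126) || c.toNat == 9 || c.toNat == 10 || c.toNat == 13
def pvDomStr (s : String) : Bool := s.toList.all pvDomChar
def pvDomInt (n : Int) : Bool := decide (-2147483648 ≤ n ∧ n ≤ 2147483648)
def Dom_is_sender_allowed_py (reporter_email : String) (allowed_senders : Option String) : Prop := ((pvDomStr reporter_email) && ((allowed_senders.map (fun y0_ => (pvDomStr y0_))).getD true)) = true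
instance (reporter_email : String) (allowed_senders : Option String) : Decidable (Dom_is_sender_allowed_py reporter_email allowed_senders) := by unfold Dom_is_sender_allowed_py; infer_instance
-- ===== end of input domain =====

-- B replaces A's per-entry prefix/suffix scan by a prebuilt index (an exact-email set and a domain
-- set) answered with membership lookups on the email and its after-'@' suffixes; objective: idiomatic.

-- ===== PORT A =====
-- the `for entry in entries` loop with early `return True` (branches in Python's order)
def matchLoopA (email_lower : String) : List String → Bool
  | [] => false
  | entry :: rest =>
    if PySem.Str.startswith entry "@" then
      if PySem.Str.endswith email_lower entry then true else matchLoopA email_lower rest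
    else if !(PySem.Str.isIn "@" entry) then
      -- `"@" + entry` is String.ofList ('@' :: entry.toList) (exact concatenation)
      if PySem.Str.endswith email_lower (String.ofList ('@' :: entry.toList)) then true
      else matchLoopA email_lower rest
    else
      if email_lower == entry then true else matchLoopA email_lower rest

def is_sender_allowed_py (reporter_email : String) (allowed_senders : Option String) : Bool :=
  match allowed_senders with
  | none => true                                      -- `not allowed_senders` (None)
  | some s =>
    if s == "" || PySem.Str.strip s == "" then true   -- `not allowed_senders or not allowed_senders.strip()`
    else
      -- `s.split(",")`: sep ≠ "" so split? is always `some`; `.getD []` is the total form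
      let entries := (((PySem.Str.split? s ",").getD []).filter
          (fun e => !(PySem.Str.strip e == ""))).map (fun e => PySem.Str.lower (PySem.Str.strip e))
      if entries == [] then true
      else
        -- `(reporter_email or "").lower()` = lower of reporter_email (lower "" = "")
        matchLoopA (PySem.Str.lower reporter_email) entries

-- ===== PORT B =====
-- loop body of B's entry-classifying pass over the (exact_emails, domains) accumulator
def altStep (p : PySem.Set String × PySem.Set String) (entry : String) :
    PySem.Set String × PySem.Set String :=
  if PySem.Str.startswith entry "@" then
    (p.1, PySem.Set.add p.2 (PySem.Str.slice entry (some 1) none))   -- entry[1:]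
  else if !(PySem.Str.isIn "@" entry) then
    (p.1, PySem.Set.add p.2 entry)
  else
    (PySem.Set.add p.1 entry, p.2)

-- `tail.split("@", 1)[1]`: the code points after the first '@' (exact hand port)
def afterAt (cs : List Char) : List Char := (cs.dropWhile (fun c => !(c == '@'))).tail

-- termination of the while loop: the part after the first '@' is strictly shorter
theorem afterAt_length_lt (cs : List Char) (h : '@' ∈ cs) : (afterAt cs).length < cs.length := by
  have hne : cs.dropWhile (fun c => !(c == '@')) ≠ [] := by
    intro hnil
    have := (List.dropWhile_eq_nil_iff).1 hnil '@' h
    simp at this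
  have h1 : (cs.dropWhile (fun c => !(c == '@'))).length ≤ cs.length :=
    List.length_dropWhile_le _ _
  have h2 : 0 < (cs.dropWhile (fun c => !(c == '@'))).length := List.length_pos_of_ne_nil hne
  unfold afterAt
  rw [List.length_tail]
  omega

-- B's `while "@" in tail: tail = tail.split("@", 1)[1]; if tail in domains: return True`
-- on code points (exact: `"@" in tail` is '@' ∈ tail)
def tailLoopB (domains : PySem.Set String) (tail : List Char) : Bool :=
  if h : '@' ∈ tail then
    if PySem.Set.contains domains (String.ofList (afterAt tail)) then true
    else tailLoopB domains (afterAt tail)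
  else false
termination_by tail.length
decreasing_by exact afterAt_length_lt tail h

def is_sender_allowed_py_alt (reporter_email : String) (allowed_senders : Option String) : Bool :=
  match allowed_senders with
  | none => true
  | some s =>
    if s == "" || PySem.Str.strip s == "" then true
    else
      let entries := (((PySem.Str.split? s ",").getD []).filter
          (fun e => !(PySem.Str.strip e == ""))).map (fun e => PySem.Str.lower (PySem.Str.strip e))
      if entries == [] then true
      else
        let idx := entries.foldl altStep (PySem.Set.empty, PySem.Set.empty)
        let email_lower := PySem.Str.lower reporter_email
        if PySem.Set.contains idx.1 email_lower then true
        else tailLoopB idx.2 email_lower.toList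

-- ===== PRECONDITION & SPEC =====
def Spec_is_sender_allowed_py (reporter_email : String) (allowed_senders : Option String) (out : Bool) : Prop := out = is_sender_allowed_py_alt reporter_email allowed_senders
instance (reporter_email : String) (allowed_senders : Option String) (out : Bool) : Decidable (Spec_is_sender_allowed_py reporter_email allowed_senders out) := by unfold Spec_is_sender_allowed_py; infer_instance

-- ===== CLAIM (what is proved, stated in full; the proofs are below) =====
def Claim_equal_is_sender_allowed_py : Prop := ∀ (reporter_email : String) (allowed_senders : Option String), Dom_is_sender_allowed_py reporter_email allowed_senders → Spec_is_sender_allowed_py reporter_email allowed_senders (is_sender_allowed_py reporter_email allowed_senders)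

-- ===== LEMMAS AND PROOFS =====

-- classification of an allowlist entry (mirrors the shared branch conditions)
def isExactE (e : String) : Bool := !(PySem.Str.startswith e "@") && PySem.Str.isIn "@" e
def isDomE (e : String) : Bool := PySem.Str.startswith e "@" || !(PySem.Str.isIn "@" e)
def domOf (e : String) : String :=
  if PySem.Str.startswith e "@" then PySem.Str.slice e (some 1) none else e

-- the one-entry test performed by A's loop
def matchOneA (email e : String) : Bool :=
  if PySem.Str.startswith e "@" then PySem.Str.endswith email e
  else if !(PySem.Str.isIn "@" e) then
    PySem.Str.endswith email (String.ofList ('@' :: e.toList))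
  else email == e

theorem matchLoopA_cons (email e : String) (rest : List String) :
    matchLoopA email (e :: rest) = (matchOneA email e || matchLoopA email rest) := by
  rw [matchLoopA]
  unfold matchOneA
  split_ifs <;> simp_all

-- what each entry contributes to the two sets built by B's fold
theorem mem_fold_fst (E : List String) (p : PySem.Set String × PySem.Set String) (x : String) :
    x ∈ (E.foldl altStep p).1 ↔ x ∈ p.1 ∨ ∃ e ∈ E, isExactE e = true ∧ x = e := by
  induction E generalizing p with
  | nil => simp
  | cons a rest ih =>
    rw [List.foldl_cons, ih, List.exists_mem_cons_iff]
    cases h1 : PySem.Chars.startswith a.toList ['@'] with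
    | true =>
      have hx : isExactE a = false := by simp [isExactE, h1]
      simp [altStep, h1, hx]
    | false =>
      cases h2 : PySem.Chars.isIn ['@'] a.toList with
      | true =>
        have hx : isExactE a = true := by simp [isExactE, h1, h2]
        simp [altStep, h1, h2, hx, PySem.Set.mem_add]
        tauto
      | false =>
        have hx : isExactE a = false := by simp [isExactE, h1, h2]
        simp [altStep, h1, h2, hx]

theorem mem_fold_snd (E : List String) (p : PySem.Set String × PySem.Set String) (d : String) :
    d ∈ (E.foldl altStep p).2 ↔ d ∈ p.2 ∨ ∃ e ∈ E, isDomE e = true ∧ d = domOf e := by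
  induction E generalizing p with
  | nil => simp
  | cons a rest ih =>
    rw [List.foldl_cons, ih, List.exists_mem_cons_iff]
    cases h1 : PySem.Chars.startswith a.toList ['@'] with
    | true =>
      have hd : isDomE a = true := by simp [isDomE, h1]
      have hdo : domOf a = PySem.Str.slice a (some 1) none := by simp [domOf, h1]
      simp [altStep, h1, hd, hdo, PySem.Set.mem_add]
      tauto
    | false =>
      cases h2 : PySem.Chars.isIn ['@'] a.toList with
      | true =>
        have hd : isDomE a = false := by simp [isDomE, h1, h2]
        simp [altStep, h1, h2, hd]
      | false =>
        have hd : isDomE a = true := by simp [isDomE, h1, h2]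
        have hdo : domOf a = a := by simp [domOf, h1]
        simp [altStep, h1, h2, hd, hdo, PySem.Set.mem_add]
        tauto

-- unfolding lemmas for B's while loop
theorem tailLoopB_nil (D : PySem.Set String) : tailLoopB D [] = false := by
  rw [tailLoopB]; simp

theorem afterAt_cons_at (rest : List Char) : afterAt ('@' :: rest) = rest := by
  simp [afterAt]

theorem afterAt_cons_ne (c : Char) (rest : List Char) (hc : c ≠ '@') :
    afterAt (c :: rest) = afterAt rest := by
  simp [afterAt, hc]

theorem tailLoopB_cons_at (D : PySem.Set String) (rest : List Char) :
    tailLoopB D ('@' :: rest) =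
      (PySem.Set.contains D (String.ofList rest) || tailLoopB D rest) := by
  rw [tailLoopB, dif_pos (List.mem_cons_self ..), afterAt_cons_at]
  cases hD : PySem.Set.contains D (String.ofList rest)
  · simp only [hD, Bool.false_eq_true, if_false, Bool.false_or]
  · simp only [hD, if_true, Bool.true_or]

theorem tailLoopB_cons_ne (D : PySem.Set String) (c : Char) (rest : List Char) (hc : c ≠ '@') :
    tailLoopB D (c :: rest) = tailLoopB D rest := by
  by_cases h : '@' ∈ rest
  · rw [tailLoopB, dif_pos (List.mem_cons_of_mem _ h), afterAt_cons_ne c rest hc]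
    conv_rhs => rw [tailLoopB, dif_pos h]
  · have hmem : '@' ∉ c :: rest := by simp [h, Ne.symm hc]
    rw [tailLoopB, dif_neg hmem, tailLoopB, dif_neg h]

-- the while loop finds a domain iff some after-'@' suffix of the email is in the set
theorem tailLoopB_iff (D : PySem.Set String) (cs : List Char) :
    tailLoopB D cs = true ↔ ∃ t, ('@' :: t) <:+ cs ∧ String.ofList t ∈ D := by
  induction cs with
  | nil => simp [tailLoopB_nil]
  | cons c rest ih =>
    by_cases hc : c = '@'
    · subst hc
      rw [tailLoopB_cons_at]
      simp only [Bool.or_eq_true, ih, PySem.Set.contains_iff]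
      constructor
      · rintro (h | ⟨t, hsuf, hm⟩)
        · exact ⟨rest, List.suffix_refl _, h⟩
        · exact ⟨t, hsuf.trans (List.suffix_cons _ _), hm⟩
      · rintro ⟨t, hsuf, hm⟩
        rcases List.suffix_cons_iff.1 hsuf with h | h
        · left; injection h with h1 h2; exact h2 ▸ hm
        · right; exact ⟨t, h, hm⟩
    · rw [tailLoopB_cons_ne D c rest hc, ih]
      constructor
      · rintro ⟨t, hsuf, hm⟩
        exact ⟨t, hsuf.trans (List.suffix_cons _ _), hm⟩
      · rintro ⟨t, hsuf, hm⟩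
        rcases List.suffix_cons_iff.1 hsuf with h | h
        · injection h with h1 h2; exact absurd h1.symm hc
        · exact ⟨t, h, hm⟩

-- one entry, A's three branches, characterized by classification + suffix condition
theorem matchOneA_iff (email e : String) :
    matchOneA email e = true ↔
      ((isExactE e = true ∧ email = e) ∨
        (isDomE e = true ∧ ('@' :: (domOf e).toList) <:+ email.toList)) := by
  unfold matchOneA
  cases h1 : PySem.Chars.startswith e.toList ['@'] with
  | true =>
    have hx : isExactE e = false := by simp [isExactE, h1]
    have hd : isDomE e = true := by simp [isDomE, h1]
    obtain ⟨d, hd'⟩ := (PySem.Chars.startswith_iff e.toList ['@']).1 h1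
    have he : e.toList = '@' :: d := by simpa using hd'.symm
    have h1' : PySem.Str.startswith e "@" = true := by simpa using h1
    have hdom : (domOf e).toList = d := by
      rw [domOf, if_pos h1']
      have hslice : PySem.List.slice ('@' :: d) (some 1) = d := by
        rw [PySem.List.slice_from ('@' :: d) (by norm_num : (0:Int) ≤ 1)]
        simp
      simp [he, hslice]
    rw [if_pos h1', hx, hd, hdom, PySem.Str.endswith_eq, PySem.Chars.endswith_iff, he]
    simp
  | false =>
    have h1' : PySem.Str.startswith e "@" = false := by simpa using h1
    cases h2 : PySem.Chars.isIn ['@'] e.toList with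
    | true =>
      have h2' : PySem.Str.isIn "@" e = true := by simpa using h2
      have hx : isExactE e = true := by simp [isExactE, h1, h2]
      have hd : isDomE e = false := by simp [isDomE, h1, h2]
      rw [if_neg (by simp [h1]), if_neg (by simp [h2]), hx, hd]
      simp
    | false =>
      have h2' : PySem.Str.isIn "@" e = false := by simpa using h2
      have hx : isExactE e = false := by simp [isExactE, h1, h2]
      have hd : isDomE e = true := by simp [isDomE, h1, h2]
      have hdom : domOf e = e := by simp [domOf, h1]
      rw [if_neg (by simp [h1]), if_pos (by simp [h2]), hx, hd, hdom,
        PySem.Str.endswith_eq, String.toList_ofList, PySem.Chars.endswith_iff]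
      simp

-- A's scan loop is an existential over entries
theorem matchLoopA_iff (email : String) (E : List String) :
    matchLoopA email E = true ↔
      ∃ e ∈ E,
        ((isExactE e = true ∧ email = e) ∨
          (isDomE e = true ∧ ('@' :: (domOf e).toList) <:+ email.toList)) := by
  induction E with
  | nil => simp [matchLoopA]
  | cons e rest ih =>
    rw [matchLoopA_cons, List.exists_mem_cons_iff]
    simp [matchOneA_iff, ih]

-- the core: A's scan equals B's two lookups, for any entry list and any email
theorem coreAB (email : String) (E : List String) :
    matchLoopA email E =
      (PySem.Set.contains (E.foldl altStep (PySem.Set.empty, PySem.Set.empty)).1 email ||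
        tailLoopB (E.foldl altStep (PySem.Set.empty, PySem.Set.empty)).2 email.toList) := by
  rw [Bool.eq_iff_iff]
  simp only [Bool.or_eq_true, PySem.Set.contains_iff, matchLoopA_iff, tailLoopB_iff,
    mem_fold_fst, mem_fold_snd, PySem.Set.empty, List.not_mem_nil, false_or]
  constructor
  · rintro ⟨a, ha, ⟨hx, heq⟩ | ⟨hdc, hsuf⟩⟩
    · exact Or.inl ⟨a, ha, hx, heq⟩
    · exact Or.inr ⟨(domOf a).toList, hsuf, ⟨a, ha, hdc, String.ofList_toList⟩⟩
  · rintro (⟨a, ha, hx, heq⟩ | ⟨t, hsuf, a, ha, hdc, hdom⟩)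
    · exact ⟨a, ha, Or.inl ⟨hx, heq⟩⟩
    · refine ⟨a, ha, Or.inr ⟨hdc, ?_⟩⟩
      have ht : t = (domOf a).toList := by
        have := congrArg String.toList hdom
        rwa [String.toList_ofList] at this
      rwa [ht] at hsuf

-- ===== VERDICT (by name: the statement is the Claim_ definition above) =====
theorem is_sender_allowed_py_spec : Claim_equal_is_sender_allowed_py := by
  intro reporter_email allowed_senders _
  unfold Spec_is_sender_allowed_py is_sender_allowed_py is_sender_allowed_py_alt
  cases allowed_senders with
  | none => rfl
  | some s =>
    simp only
    split_ifs with h1 h2 h3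
    · rfl
    · rfl
    · rw [coreAB]
      simp only [h3, Bool.true_or]
    · rw [coreAB]
      simp only [Bool.not_eq_true] at h3
      simp only [h3, Bool.false_or]
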